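-- pv_equiv track=rewrite | github.com/AndreasFjader/Advent-of-Code | Day 10/day10.py | get_next_possible_step
-- ===== SOURCE A (Python) =====
-- def get_next_possible_step(r, c, t):
--     up = "|F7"
--     down = "|JL"
--     left = "-FL"
--     right = "-7J"
--     steps = []
--     if t == 'S':
--         steps.extend([(r + 1, c, tp) for tp in down])
--         steps.extend([(r - 1, c, tp) for tp in up])
--         steps.extend([(r, c + 1, tp) for tp in right])
--         steps.extend([(r, c - 1, tp) for tp in left])
--         return steps
--     if t == '|':
--         steps.extend([(r + 1, c, tp) for tp in down])
--         steps.extend([(r - 1, c, tp) for tp in up])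
--         return steps
--     if t == '-':
--         steps.extend([(r, c + 1, tp) for tp in right])
--         steps.extend([(r, c - 1, tp) for tp in left])
--         return steps
--     if t == 'L':
--         steps.extend([(r, c + 1, tp) for tp in right])
--         steps.extend([(r - 1, c, tp) for tp in up])
--         return steps
--     if t == 'J':
--         steps.extend([(r, c - 1, tp) for tp in left])
--         steps.extend([(r - 1, c, tp) for tp in up])
--         return steps
--     if t == '7':
--         steps.extend([(r + 1, c, tp) for tp in down])
--         steps.extend([(r, c - 1, tp) for tp in left])
--         return steps
--     if t == 'F':
--         steps.extend([(r + 1, c, tp) for tp in down])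
--         steps.extend([(r, c + 1, tp) for tp in right])
--         return steps
--
--     raise Exception('Unaccepted symbol.')
-- ===== SOURCE B (Python) =====
-- def get_next_possible_step(r, c, t):
--     up = "|F7"
--     down = "|JL"
--     left = "-FL"
--     right = "-7J"
--     if len(t) != 1 or (t != 'S' and t not in up + down + left + right):
--         raise Exception('Unaccepted symbol.')
--     # Pipe connections are symmetric: the tiles reachable when stepping UP ("|F7")
--     # are exactly the tiles that themselves connect DOWN, and so on. So instead of
--     # dispatching on the tile, derive which directions t connects to by membership
--     # in the opposite-direction target strings ('S' connects everywhere).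
--     connects = {
--         'D': t == 'S' or t in up,
--         'U': t == 'S' or t in down,
--         'R': t == 'S' or t in left,
--         'L': t == 'S' or t in right,
--     }
--     emit = {'D': (1, 0, down), 'U': (-1, 0, up), 'R': (0, 1, right), 'L': (0, -1, left)}
--     order = 'DURL' if t == 'S' else 'DRLU'
--     steps = []
--     for d in order:
--         if connects[d]:
--             dr, dc, targets = emit[d]
--             steps.extend((r + dr, c + dc, tp) for tp in targets)
--     return steps
-- ===== Notes on version B (the rewrite author's own statement) =====
-- stated objective: alternative
-- what changed: Instead of dispatching on the tile with a seven-branch if-chain of hardcoded step lists, B derives which directions the tile connects to from pipe symmetry (membership of the tile in the opposite-direction target strings) and emits the steps in one loop over a direction-priority order.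
import Mathlib
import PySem

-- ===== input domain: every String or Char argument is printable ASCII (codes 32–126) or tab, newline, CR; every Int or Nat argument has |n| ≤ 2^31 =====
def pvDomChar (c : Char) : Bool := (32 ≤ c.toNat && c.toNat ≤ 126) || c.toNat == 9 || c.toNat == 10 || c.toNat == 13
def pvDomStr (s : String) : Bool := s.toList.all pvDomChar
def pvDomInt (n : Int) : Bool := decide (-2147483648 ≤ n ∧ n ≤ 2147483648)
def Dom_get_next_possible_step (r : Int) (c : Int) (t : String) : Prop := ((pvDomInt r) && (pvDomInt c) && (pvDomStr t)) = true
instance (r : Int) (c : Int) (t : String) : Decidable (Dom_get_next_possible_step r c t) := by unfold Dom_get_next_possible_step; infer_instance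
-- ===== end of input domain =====

-- B derives a tile's connected directions from pipe symmetry (membership in the opposite-direction
-- target strings) and emits steps in one loop over a direction order, instead of A's per-tile if-chain
-- (alternative decomposition; same cost).
-- ===== PORT A =====
def get_next_possible_step (r : Int) (c : Int) (t : String) : List (Int × Int × String) :=
  let up := "|F7"
  let down := "|JL"
  let left := "-FL"
  let right := "-7J"
  let steps : List (Int × Int × String) := []
  if t == "S" then
    steps ++ down.toList.map (fun tp => (r + 1, c, String.mk [tp]))
          ++ up.toList.map (fun tp => (r - 1, c, String.mk [tp]))
          ++ right.toList.map (fun tp => (r, c + 1, String.mk [tp]))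
          ++ left.toList.map (fun tp => (r, c - 1, String.mk [tp]))
  else if t == "|" then
    steps ++ down.toList.map (fun tp => (r + 1, c, String.mk [tp]))
          ++ up.toList.map (fun tp => (r - 1, c, String.mk [tp]))
  else if t == "-" then
    steps ++ right.toList.map (fun tp => (r, c + 1, String.mk [tp]))
          ++ left.toList.map (fun tp => (r, c - 1, String.mk [tp]))
  else if t == "L" then
    steps ++ right.toList.map (fun tp => (r, c + 1, String.mk [tp]))
          ++ up.toList.map (fun tp => (r - 1, c, String.mk [tp]))
  else if t == "J" then
    steps ++ left.toList.map (fun tp => (r, c - 1, String.mk [tp]))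
          ++ up.toList.map (fun tp => (r - 1, c, String.mk [tp]))
  else if t == "7" then
    steps ++ down.toList.map (fun tp => (r + 1, c, String.mk [tp]))
          ++ left.toList.map (fun tp => (r, c - 1, String.mk [tp]))
  else if t == "F" then
    steps ++ down.toList.map (fun tp => (r + 1, c, String.mk [tp]))
          ++ right.toList.map (fun tp => (r, c + 1, String.mk [tp]))
  else
    []  -- Python raises Exception('Unaccepted symbol.') here; excluded by Pre_

-- ===== PORT B =====
def get_next_possible_step_alt (r : Int) (c : Int) (t : String) : List (Int × Int × String) :=
  let up := "|F7"
  let down := "|JL"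
  let left := "-FL"
  let right := "-7J"
  if PySem.Str.len t != 1 || (t != "S" && !(PySem.Str.isIn t (up ++ down ++ left ++ right))) then
    []  -- Python B raises Exception('Unaccepted symbol.') here; excluded by Pre_
  else
    -- connects[d]: t connects in direction d, derived from the opposite-direction target strings
    let connects : Char → Bool := fun d =>
      if d == 'D' then t == "S" || PySem.Str.isIn t up
      else if d == 'U' then t == "S" || PySem.Str.isIn t down
      else if d == 'R' then t == "S" || PySem.Str.isIn t left
      else t == "S" || PySem.Str.isIn t right
    let emit : Char → Int × Int × String := fun d =>
      if d == 'D' then (1, 0, down)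
      else if d == 'U' then (-1, 0, up)
      else if d == 'R' then (0, 1, right)
      else (0, -1, left)
    let order := if t == "S" then "DURL" else "DRLU"
    order.toList.foldl (fun steps d =>
      if connects d then
        steps ++ (emit d).2.2.toList.map (fun tp => (r + (emit d).1, c + (emit d).2.1, String.mk [tp]))
      else steps) []

-- ===== PRECONDITION & SPEC =====
-- Pre_ excludes exactly the tiles on which A raises Exception('Unaccepted symbol.').
def Pre_get_next_possible_step (r : Int) (c : Int) (t : String) : Prop :=
  t = "S" ∨ t = "|" ∨ t = "-" ∨ t = "L" ∨ t = "J" ∨ t = "7" ∨ t = "F"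
instance (r : Int) (c : Int) (t : String) : Decidable (Pre_get_next_possible_step r c t) := by unfold Pre_get_next_possible_step; infer_instance
def pvWitness_get_next_possible_step : Int × Int × String := (2, 3, "S")
def Spec_get_next_possible_step (r : Int) (c : Int) (t : String) (out : List (Int × Int × String)) : Prop := out = get_next_possible_step_alt r c t
instance (r : Int) (c : Int) (t : String) (out : List (Int × Int × String)) : Decidable (Spec_get_next_possible_step r c t out) := by unfold Spec_get_next_possible_step; infer_instance

-- ===== CLAIM =====
def Claim_equal_get_next_possible_step : Prop := ∀ (r : Int) (c : Int) (t : String), Dom_get_next_possible_step r c t → Pre_get_next_possible_step r c t → Spec_get_next_possible_step r c t (get_next_possible_step r c t)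

-- ===== LEMMAS AND PROOFS =====
-- 'ch in s' for a single character reduces to list membership
theorem isIn_singleton (a : Char) (s : List Char) :
    PySem.Chars.isIn [a] s = s.contains a := by
  cases hc : s.contains a
  · rw [PySem.Chars.isIn_eq_false_iff]
    intro ⟨pre, post, heq⟩
    have : a ∈ s := by subst heq; simp
    simp [List.contains_eq_mem, this] at hc
  · rw [PySem.Chars.isIn_iff_infix]
    have : a ∈ s := by simpa [List.contains_eq_mem] using hc
    obtain ⟨s1, s2, rfl⟩ := List.mem_iff_append.mp this
    exact ⟨s1, s2, by simp⟩

-- ===== VERDICT =====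
theorem get_next_possible_step_spec : Claim_equal_get_next_possible_step := by
  intro r c t _ hPre
  unfold Spec_get_next_possible_step
  rcases hPre with h | h | h | h | h | h | h <;> subst h <;>
    simp [get_next_possible_step, get_next_possible_step_alt, isIn_singleton, List.foldl] <;> omega
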